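-- pv_equiv track=rewrite | github.com/krtex/advent_of_code_2018 | 12/day12.py | create_masks_from_text
-- ===== SOURCE A (Python) =====
-- def to_num(char):
--     return 1 if (char == '#') else 0
--
-- def create_masks_from_text(body):
--     masks = []
--     temp = 0
--     for i, c in enumerate(body):
--         if 5 == i % 6:
--             masks.append((temp, to_num(c)))
--             temp = 0
--         else:
--             temp |= to_num(c) << 4 - (i % 6)
--     return masks
-- ===== SOURCE B (Python) =====
-- def create_masks_from_text(body):
--     masks = []
--     i = 0
--     while i + 6 <= len(body):
--         block = body[i:i+6]
--         mask = 0
--         for c in block[:5]: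
--             mask = mask * 2 + (1 if c == '#' else 0)
--         masks.append((mask, 1 if block[5] == '#' else 0))
--         i += 6
--     return masks
-- ===== Notes on version B (the rewrite author's own statement) =====
-- stated objective: faster
-- what changed: B consumes the string in complete 6-character chunks (slice the block at index i, Horner-fold the first five chars into the mask, take the sixth as the bit), replacing A's flat per-character loop with a modulo-6 index test and a shift-OR accumulator.
import Mathlib
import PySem

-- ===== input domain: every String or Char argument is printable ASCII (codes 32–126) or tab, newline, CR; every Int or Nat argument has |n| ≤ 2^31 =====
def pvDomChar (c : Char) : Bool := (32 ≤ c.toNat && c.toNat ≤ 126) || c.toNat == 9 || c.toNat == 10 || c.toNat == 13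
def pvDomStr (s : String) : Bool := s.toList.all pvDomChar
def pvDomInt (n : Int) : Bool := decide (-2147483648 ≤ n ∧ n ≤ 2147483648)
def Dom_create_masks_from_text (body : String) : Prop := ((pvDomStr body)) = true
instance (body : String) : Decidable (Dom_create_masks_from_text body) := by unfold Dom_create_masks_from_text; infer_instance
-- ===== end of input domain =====

-- B replaces A's flat index-modulo character loop with shift-OR accumulator by an idiomatic
-- chunk-at-a-time decomposition (slice a 6-char block at index i, Horner-fold the mask).

-- ===== PORT A =====
def to_num (c : Char) : Int := if c = '#' then 1 else 0

-- A's for-loop as structural recursion carrying (masks, temp, i);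
-- the shift amount 4 - i % 6 is ≥ 0 on that branch (i % 6 ≤ 4), so .toNat is exact
def pvALoop (masks : List (Int × Int)) (temp : Int) (i : Int) : List Char → List (Int × Int)
  | [] => masks
  | c :: rest =>
    if (5 : Int) = i % 6 then pvALoop (masks ++ [(temp, to_num c)]) 0 (i + 1) rest
    else pvALoop masks (PySem.Int.bor temp (to_num c <<< (4 - i % 6).toNat)) (i + 1) rest

def create_masks_from_text (body : String) : List (Int × Int) :=
  pvALoop [] 0 0 body.toList

-- ===== PORT B =====
-- B's while-loop: at index i slice the full 6-char block, Horner-fold block[:5], block[5] is the bit;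
-- i only ever holds 0, 6, 12, …, so it is carried as a Nat
def pvBLoop (body : List Char) (masks : List (Int × Int)) (i : Nat) : List (Int × Int) :=
  if _h : i + 6 ≤ body.length then
    let block := PySem.List.slice body (some (i : Int)) (some ((i : Int) + 6))
    let mask := (PySem.List.slice block (some 0) (some 5)).foldl
      (fun m c => m * 2 + (if c = '#' then (1 : Int) else 0)) 0
    pvBLoop body (masks ++ [(mask, if (PySem.List.pyGet? block 5).getD ' ' = '#' then (1 : Int) else 0)]) (i + 6)
  else masks
termination_by body.length - i

def create_masks_from_text_alt (body : String) : List (Int × Int) :=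
  pvBLoop body.toList [] 0

-- ===== PRECONDITION & SPEC =====
def Spec_create_masks_from_text (body : String) (out : List (Int × Int)) : Prop := out = create_masks_from_text_alt body
instance (body : String) (out : List (Int × Int)) : Decidable (Spec_create_masks_from_text body out) := by unfold Spec_create_masks_from_text; infer_instance

-- ===== CLAIM (what is proved, stated in full; the proofs are below) =====
def Claim_equal_create_masks_from_text : Prop := ∀ (body : String), Dom_create_masks_from_text body → Spec_create_masks_from_text body (create_masks_from_text body)

-- ===== LEMMAS AND PROOFS =====

-- a run of A's loop over fewer than 6 - i % 6 characters emits nothing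
lemma pvALoop_short (rest : List Char) : ∀ (m : List (Int × Int)) (t i : Int),
    (rest.length : Int) + i % 6 ≤ 5 → pvALoop m t i rest = m := by
  induction rest with
  | nil => intro m t i _; rfl
  | cons c rest ih =>
    intro m t i h
    simp only [List.length_cons] at h
    have hcond : ¬ ((5 : Int) = i % 6) := by push_cast at h; omega
    simp only [pvALoop, if_neg hcond]
    apply ih
    push_cast at h ⊢
    omega

lemma pvALoop_skip (m : List (Int × Int)) (t i : Int) (c : Char) (rest : List Char)
    (h : ¬ ((5 : Int) = i % 6)) :
    pvALoop m t i (c :: rest)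
      = pvALoop m (PySem.Int.bor t (to_num c <<< (4 - i % 6).toNat)) (i + 1) rest := by
  simp only [pvALoop]
  rw [if_neg h]

lemma pvALoop_emit (m : List (Int × Int)) (t i : Int) (c : Char) (rest : List Char)
    (h : (5 : Int) = i % 6) :
    pvALoop m t i (c :: rest) = pvALoop (m ++ [(t, to_num c)]) 0 (i + 1) rest := by
  simp only [pvALoop]
  rw [if_pos h]

-- one full 6-character block of B's loop, with the slices and the fold evaluated
lemma pvBLoop_step (body : List Char) (m : List (Int × Int)) (i : Nat)
    (h : i + 6 ≤ body.length) (c0 c1 c2 c3 c4 c5 : Char) (rest' : List Char)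
    (hL : body.drop i = c0 :: c1 :: c2 :: c3 :: c4 :: c5 :: rest') :
    pvBLoop body m i
      = pvBLoop body (m ++ [(((((((0 : Int) * 2 + (if c0 = '#' then 1 else 0)) * 2 + (if c1 = '#' then 1 else 0)) * 2
          + (if c2 = '#' then 1 else 0)) * 2 + (if c3 = '#' then 1 else 0)) * 2 + (if c4 = '#' then 1 else 0)),
          if c5 = '#' then (1 : Int) else 0)]) (i + 6) := by
  rw [pvBLoop, dif_pos h]
  have hb : PySem.List.slice body (some (i : Int)) (some ((i : Int) + 6)) = [c0, c1, c2, c3, c4, c5] := by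
    rw [PySem.List.slice_toNat _ (by positivity) (by positivity)]
    have h1 : ((i : Int)).toNat = i := by omega
    have h2 : ((i : Int) + 6).toNat = i + 6 := by omega
    rw [h1, h2, hL]
    have h3 : i + 6 - i = 6 := by omega
    rw [h3]
    rfl
  rw [hb]
  simp [PySem.List.slice, PySem.List.clampIdx, PySem.List.pyGet?, PySem.List.pyIdx?]

lemma loop_eq (body : List Char) : ∀ (n k : Nat), body.length ≤ 6 * k + n →
    ∀ m, pvALoop m 0 (6 * (k : Int)) (body.drop (6 * k)) = pvBLoop body m (6 * k) := by
  intro n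
  induction n with
  | zero =>
    intro k hlen m
    rw [pvBLoop, dif_neg (by omega), List.drop_eq_nil_of_le (by omega)]
    rfl
  | succ n ih =>
    intro k hlen m
    by_cases h6 : 6 * k + 6 ≤ body.length
    · -- at least one full block remains at index 6*k
      have hl : 6 ≤ (body.drop (6 * k)).length := by simp [List.length_drop]; omega
      rcases hL : body.drop (6 * k) with _|⟨c0,_|⟨c1,_|⟨c2,_|⟨c3,_|⟨c4,_|⟨c5,rest'⟩⟩⟩⟩⟩⟩ <;>
        rw [hL] at hl <;> simp at hl
      -- six steps of A's loop over the block
      rw [pvALoop_skip _ _ _ _ _ (by omega), pvALoop_skip _ _ _ _ _ (by omega),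
          pvALoop_skip _ _ _ _ _ (by omega), pvALoop_skip _ _ _ _ _ (by omega),
          pvALoop_skip _ _ _ _ _ (by omega), pvALoop_emit _ _ _ _ _ (by omega)]
      have e0 : (4 - 6 * (k : Int) % 6).toNat = 4 := by omega
      have e1 : (4 - (6 * (k : Int) + 1) % 6).toNat = 3 := by omega
      have e2 : (4 - (6 * (k : Int) + 1 + 1) % 6).toNat = 2 := by omega
      have e3 : (4 - (6 * (k : Int) + 1 + 1 + 1) % 6).toNat = 1 := by omega
      have e4 : (4 - (6 * (k : Int) + 1 + 1 + 1 + 1) % 6).toNat = 0 := by omega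
      rw [e0, e1, e2, e3, e4]
      have hidx : 6 * (k : Int) + 1 + 1 + 1 + 1 + 1 + 1 = 6 * ((k + 1 : Nat) : Int) := by push_cast; ring
      have hrest : rest' = body.drop (6 * (k + 1)) := by
        have h' := congrArg (List.drop 6) hL
        rw [List.drop_drop] at h'
        have h'' : body.drop (6 * k + 6) = rest' := by rw [h']; rfl
        rw [show 6 * (k + 1) = 6 * k + 6 from by omega]
        exact h''.symm
      rw [hidx, hrest]
      rw [ih (k + 1) (by omega)]
      have hk6 : 6 * (k + 1) = 6 * k + 6 := by omega
      rw [hk6]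
      rw [pvBLoop_step body m (6 * k) h6 c0 c1 c2 c3 c4 c5 rest' hL]
      congr 3
      simp only [to_num]
      split_ifs <;> decide
    · -- fewer than 6 characters remain: A emits nothing more, B's guard fails
      rw [pvBLoop, dif_neg (by omega), pvALoop_short]
      have : 6 * (k : Int) % 6 = 0 := by omega
      rw [this]
      simp only [List.length_drop]
      omega

-- ===== VERDICT (by name: the statement is the Claim_ definition above) =====
theorem create_masks_from_text_spec : Claim_equal_create_masks_from_text := by
  intro body _
  unfold Spec_create_masks_from_text create_masks_from_text create_masks_from_text_alt
  have := loop_eq body.toList body.toList.length 0 (by omega) []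
  simpa using this
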